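-- pv_equiv track=rewrite | github.com/krazyhell/phpoptimizer | phpoptimizer/analyzers/error_analyzer.py | _count_unescaped_quotes
-- ===== SOURCE A (Python) =====
-- def _count_unescaped_quotes(text: str, quote_char: str) -> int:
--     """Compter les guillemets non échappés dans une chaîne"""
--     count = 0
--     i = 0
--     while i < len(text):
--         if text[i] == quote_char:
--             # Compter les antislashs précédents
--             escape_count = 0
--             j = i - 1
--             while j >= 0 and text[j] == '\\':
--                 escape_count += 1
--                 j -= 1
--
--             # Si nombre pair d'antislashs (ou 0), le guillemet n'est pas échappé
--             if escape_count % 2 == 0: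
--                 count += 1
--         i += 1
--
--     return count
-- ===== SOURCE B (Python) =====
-- def _count_unescaped_quotes(text: str, quote_char: str) -> int:
--     """Compter les guillemets non échappés dans une chaîne"""
--     count = 0
--     even = True  # parity of the backslash run ending just before the current char is even
--     for c in text:
--         if c == quote_char and even:
--             count += 1
--         even = (not even) if c == '\\' else True
--     return count
-- ===== Notes on version B (the rewrite author's own statement) =====
-- stated objective: faster
-- what changed: Replaced the nested backward scan of preceding backslashes at each quote with a single forward pass that tracks the parity of the current trailing backslash run.
import Mathlib
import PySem

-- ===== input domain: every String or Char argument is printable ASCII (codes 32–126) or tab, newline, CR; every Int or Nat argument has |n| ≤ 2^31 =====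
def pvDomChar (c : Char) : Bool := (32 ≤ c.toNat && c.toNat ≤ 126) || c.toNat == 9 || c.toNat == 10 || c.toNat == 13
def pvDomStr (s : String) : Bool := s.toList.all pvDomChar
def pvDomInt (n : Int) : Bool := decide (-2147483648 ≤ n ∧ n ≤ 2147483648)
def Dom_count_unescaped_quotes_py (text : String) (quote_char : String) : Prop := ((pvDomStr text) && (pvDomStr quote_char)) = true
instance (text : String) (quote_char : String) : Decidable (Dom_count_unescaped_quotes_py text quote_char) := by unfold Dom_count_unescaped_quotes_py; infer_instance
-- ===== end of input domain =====

-- B replaces A's nested backward scan of preceding backslashes at each quote with a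
-- single forward pass tracking the parity of the trailing backslash run (objective: faster).


-- ===== PORT A =====
-- inner while loop: escape count of the backslash run ending just before position i
-- (argument is i = j+1; case 0 is Python's 'j < 0' exit)
def pvEscCount (cs : List Char) : Nat → Int
  | 0 => 0
  | Nat.succ j => if cs[j]? = some '\\' then 1 + pvEscCount cs j else 0

-- outer while loop over i with accumulator count
def pvOuterA (cs : List Char) (q : String) (i : Nat) (count : Int) : Int :=
  if h : i < cs.length then
    pvOuterA cs q (i + 1)
      (if String.mk [cs[i]] = q ∧ PySem.Int.mod (pvEscCount cs i) 2 = 0 then count + 1 else count)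
  else count
termination_by cs.length - i

def count_unescaped_quotes_py (text : String) (quote_char : String) : Int :=
  pvOuterA text.toList quote_char 0 0

-- ===== PORT B =====
-- one fold step: (count, parity-even flag)
def pvStepB (q : String) : (Int × Bool) → Char → (Int × Bool)
  | (count, even), c =>
    (if String.mk [c] = q ∧ even then count + 1 else count,
     if c = '\\' then !even else true)

def count_unescaped_quotes_py_alt (text : String) (quote_char : String) : Int :=
  (text.toList.foldl (pvStepB quote_char) (0, true)).1

-- ===== PRECONDITION & SPEC =====
def Spec_count_unescaped_quotes_py (text : String) (quote_char : String) (out : Int) : Prop := out = count_unescaped_quotes_py_alt text quote_char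
instance (text : String) (quote_char : String) (out : Int) : Decidable (Spec_count_unescaped_quotes_py text quote_char out) := by unfold Spec_count_unescaped_quotes_py; infer_instance

-- ===== CLAIM (what is proved, stated in full; the proofs are below) =====
def Claim_equal_count_unescaped_quotes_py : Prop := ∀ (text : String) (quote_char : String), Dom_count_unescaped_quotes_py text quote_char → Spec_count_unescaped_quotes_py text quote_char (count_unescaped_quotes_py text quote_char)

-- ===== LEMMAS AND PROOFS =====

-- PySem.Int.mod with positive divisor 2 is Lean's emod
lemma pvMod2 (a : Int) : PySem.Int.mod a 2 = a % 2 :=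
  PySem.Int.mod_eq_emod_of_pos (by norm_num)

-- A's escape-count parity satisfies the same recurrence as B's even flag
lemma pvEven_succ (cs : List Char) (i : Nat) (h : i < cs.length) :
    (decide (PySem.Int.mod (pvEscCount cs (i + 1)) 2 = 0)) =
      (if cs[i] = '\\' then !(decide (PySem.Int.mod (pvEscCount cs i) 2 = 0)) else true) := by
  have hg : cs[i]? = some cs[i] := List.getElem?_eq_getElem h
  by_cases hb : cs[i] = '\\'
  · have hrec : pvEscCount cs (i + 1) = 1 + pvEscCount cs i := by
      simp [pvEscCount, hg, hb]
    rw [hrec, pvMod2, pvMod2]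
    by_cases he : pvEscCount cs i % 2 = 0
    · have h1 : (1 + pvEscCount cs i) % 2 = 1 := by omega
      simp [hb, he, h1]
    · have h1 : (1 + pvEscCount cs i) % 2 = 0 := by omega
      simp [hb, he, h1]
  · have hrec : pvEscCount cs (i + 1) = 0 := by
      simp [pvEscCount, hg, hb]
    simp [hrec, hb, PySem.Int.mod]

-- main invariant: A's loop from i with the current parity equals B's fold over the suffix
lemma pvOuter_eq_fold (cs : List Char) (q : String) (i : Nat) (count : Int) :
    pvOuterA cs q i count =
      ((cs.drop i).foldl (pvStepB q)
        (count, decide (PySem.Int.mod (pvEscCount cs i) 2 = 0))).1 := by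
  by_cases h : i < cs.length
  · have hdrop : cs.drop i = cs[i] :: cs.drop (i + 1) := List.drop_eq_getElem_cons h
    have hst : pvStepB q (count, decide (PySem.Int.mod (pvEscCount cs i) 2 = 0)) cs[i] =
        (if String.mk [cs[i]] = q ∧ PySem.Int.mod (pvEscCount cs i) 2 = 0 then count + 1
          else count,
         decide (PySem.Int.mod (pvEscCount cs (i + 1)) 2 = 0)) := by
      unfold pvStepB
      rw [pvEven_succ cs i h]
      by_cases h1 : String.mk [cs[i]] = q
      · by_cases h2 : PySem.Int.mod (pvEscCount cs i) 2 = 0 <;> simp [h1, h2]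
      · simp [h1]
    rw [pvOuterA, dif_pos h, pvOuter_eq_fold cs q (i + 1), hdrop, List.foldl_cons, hst]
  · rw [pvOuterA, dif_neg h, List.drop_eq_nil_of_le (by omega)]
    rfl
termination_by cs.length - i

-- ===== VERDICT (by name: the statement is the Claim_ definition above) =====
theorem count_unescaped_quotes_py_spec : Claim_equal_count_unescaped_quotes_py := by
  intro text quote_char _
  show count_unescaped_quotes_py text quote_char = count_unescaped_quotes_py_alt text quote_char
  unfold count_unescaped_quotes_py count_unescaped_quotes_py_alt
  rw [pvOuter_eq_fold]
  simp [pvEscCount, PySem.Int.mod]
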